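-- pv_equiv track=rewrite | github.com/CaptainBloodborne/PRIMEboard_backend | app_backend/utils/shard_config_getter.py | map_shard
-- ===== SOURCE A (Python) =====
-- def map_shard(shard: str):
--     split_filters_row = shard.split("filters: ")[1].split("|")
--
--     groups = list()
--
--     for group in split_filters_row:
--         filter_group = group.split("&")
--
--         for filt in filter_group:
--             if len(filt.split("=")) == 1:
--                 filter_group[filter_group.index(filt)] = "omit_f=" + filt
--
--         groups.append(
--             {
--                 c_filter.split("=")[0]: c_filter.split("=")[1].split(",")
--                 for c_filter in filter_group
--             },
--         )
--
--     return groups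
-- ===== SOURCE B (Python) =====
-- def map_shard(shard: str):
--     groups = []
--     for group in shard.split("filters: ")[1].split("|"):
--         filters = {}
--         for filt in group.split("&"):
--             parts = filt.split("=")
--             if len(parts) == 1:
--                 filters["omit_f"] = filt.split(",")
--             else:
--                 filters[parts[0]] = parts[1].split(",")
--         groups.append(filters)
--     return groups
-- ===== Notes on version B (the rewrite author's own statement) =====
-- stated objective: simpler
-- what changed: B builds each group's dict in a single pass that branches per fragment, removing A's in-place list mutation, the .index scan and the second dict-comprehension pass over the rewritten list.
import Mathlib
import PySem

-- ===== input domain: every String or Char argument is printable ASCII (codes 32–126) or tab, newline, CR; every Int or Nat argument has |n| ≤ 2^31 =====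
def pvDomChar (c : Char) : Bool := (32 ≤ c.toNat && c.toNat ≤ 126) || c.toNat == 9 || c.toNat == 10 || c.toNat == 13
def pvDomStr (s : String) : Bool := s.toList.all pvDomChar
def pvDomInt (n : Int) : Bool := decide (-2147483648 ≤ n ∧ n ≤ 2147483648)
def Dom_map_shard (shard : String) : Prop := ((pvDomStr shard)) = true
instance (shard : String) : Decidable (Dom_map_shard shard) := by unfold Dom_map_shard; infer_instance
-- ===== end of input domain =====

-- B replaces A's two-pass group processing (rewrite eq-less fragments in place via .index, then a
-- dict comprehension over the rewritten list) by one pass that branches per fragment.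

-- shared helper: s.split(sep) for a non-empty literal separator (split? is none only for sep = "")
def pysplit (s sep : String) : List String := (PySem.Str.split? s sep).getD []

-- ===== PORT A =====
-- CPython's `for filt in filter_group` over the list it mutates in place reads successive indices
-- of the CURRENT list; the length never changes, so it is exactly this index loop.
def map_shard (shard : String) : List (List (String × List String)) :=
  match PySem.List.pyGet? (pysplit shard "filters: ") 1 with
  | none => []   -- IndexError in Python: excluded by Pre_map_shard
  | some row =>
    let split_filters_row := pysplit row "|"
    split_filters_row.foldl (fun groups group =>
      let filter_group0 := pysplit group "&"
      let filter_group :=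
        (List.range filter_group0.length).foldl (fun cur i =>
          let filt := cur.getD i ""
          if (pysplit filt "=").length = 1 then
            cur.set ((PySem.List.index? cur filt).getD 0) ("omit_f=" ++ filt)
          else cur) filter_group0
      groups ++ [(filter_group.foldl (fun d c_filter =>
          d.insert ((pysplit c_filter "=").getD 0 "")
                   (pysplit ((pysplit c_filter "=").getD 1 "") ",")) PySem.Dict.empty).items])
      []

-- ===== PORT B =====
def map_shard_alt (shard : String) : List (List (String × List String)) :=
  match PySem.List.pyGet? (pysplit shard "filters: ") 1 with
  | none => []   -- IndexError in Python: excluded by Pre_map_shard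
  | some row =>
    (pysplit row "|").foldl (fun groups group =>
      groups ++ [((pysplit group "&").foldl (fun filters filt =>
          let parts := pysplit filt "="
          if parts.length = 1 then
            filters.insert "omit_f" (pysplit filt ",")
          else
            filters.insert (parts.getD 0 "") (pysplit (parts.getD 1 "") ",")) PySem.Dict.empty).items])
      []

-- ===== PRECONDITION & SPEC =====
-- A raises IndexError exactly when "filters: " does not occur in shard (split()[1] out of range);
-- Pre_ admits every input on which A returns.
def Pre_map_shard (shard : String) : Prop := PySem.Str.isIn "filters: " shard = true
instance (shard : String) : Decidable (Pre_map_shard shard) := by unfold Pre_map_shard; infer_instance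

def pvWitness_map_shard : String := "filters: a=1,2&b|c"

def Spec_map_shard (shard : String) (out : List (List (String × List String))) : Prop := out = map_shard_alt shard
instance (shard : String) (out : List (List (String × List String))) : Decidable (Spec_map_shard shard out) := by unfold Spec_map_shard; infer_instance

-- ===== CLAIM (what is proved, stated in full; the proofs are below) =====
def Claim_equal_map_shard : Prop := ∀ (shard : String), Dom_map_shard shard → Pre_map_shard shard → Spec_map_shard shard (map_shard shard)

-- ===== LEMMAS AND PROOFS =====

theorem go_zero (sep : List Char) (l cur : List Char) (acc : List (List Char)) :
    PySem.Chars.splitOn.go sep 0 l cur acc = ((cur.reverse ++ l) :: acc).reverse := by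
  cases l <;> simp [PySem.Chars.splitOn.go]

theorem go_succ_nil (sep : List Char) (fuel : Nat) (cur : List Char) (acc : List (List Char)) :
    PySem.Chars.splitOn.go sep (fuel+1) [] cur acc = (cur.reverse :: acc).reverse := by
  simp [PySem.Chars.splitOn.go]

theorem go_succ_cons (sep : List Char) (fuel : Nat) (c : Char) (rest cur : List Char) (acc : List (List Char)) :
    PySem.Chars.splitOn.go sep (fuel+1) (c :: rest) cur acc =
      if sep.isPrefixOf (c :: rest) then
        PySem.Chars.splitOn.go sep fuel (List.drop sep.length (c :: rest)) [] (cur.reverse :: acc)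
      else PySem.Chars.splitOn.go sep fuel rest (c :: cur) acc := by
  rw [PySem.Chars.splitOn.go]

theorem go_acc (sep : List Char) : ∀ (fuel : Nat) (l cur : List Char) (acc : List (List Char)),
    PySem.Chars.splitOn.go sep fuel l cur acc = acc.reverse ++ PySem.Chars.splitOn.go sep fuel l cur [] := by
  intro fuel
  induction fuel with
  | zero => intro l cur acc; simp [go_zero]
  | succ f ih =>
    intro l cur acc
    cases l with
    | nil => simp [go_succ_nil]
    | cons c rest =>
      rw [go_succ_cons, go_succ_cons]
      split
      · rw [ih _ [] (cur.reverse :: acc), ih _ [] [cur.reverse]]; simp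
      · rw [ih rest (c :: cur) acc]

theorem go_len (sep : List Char) : ∀ (fuel : Nat) (l cur : List Char) (acc : List (List Char)),
    acc.length + 1 ≤ (PySem.Chars.splitOn.go sep fuel l cur acc).length := by
  intro fuel
  induction fuel with
  | zero => intro l cur acc; simp [go_zero]
  | succ f ih =>
    intro l cur acc
    cases l with
    | nil => simp [go_succ_nil]
    | cons c rest =>
      rw [go_succ_cons]
      split
      · have := ih (List.drop sep.length (c :: rest)) [] (cur.reverse :: acc); simp at this; omega
      · exact ih rest (c :: cur) acc

-- walking a prefix p that contains no occurrence of sep, then matching sep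
theorem go_walk (sep : List Char) (hsep : sep ≠ []) :
    ∀ (p : List Char) (fuel : Nat) (rest cur : List Char) (acc : List (List Char)),
    (∀ i, i < p.length → ¬ sep <+: (p ++ sep ++ rest).drop i) → p.length + 1 ≤ fuel →
    PySem.Chars.splitOn.go sep fuel (p ++ sep ++ rest) cur acc =
      PySem.Chars.splitOn.go sep (fuel - (p.length + 1)) rest [] ((cur.reverse ++ p) :: acc) := by
  intro p
  induction p with
  | nil =>
    intro fuel rest cur acc _ hf
    obtain ⟨f, rfl⟩ : ∃ f, fuel = f + 1 := ⟨fuel - 1, by omega⟩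
    obtain ⟨c, sep', rfl⟩ : ∃ c sep', sep = c :: sep' := by
      cases sep with | nil => exact absurd rfl hsep | cons c s => exact ⟨c, s, rfl⟩
    simp only [List.nil_append, List.cons_append]
    rw [go_succ_cons]
    have hpre : (c :: sep').isPrefixOf (c :: (sep' ++ rest)) = true := by
      rw [List.isPrefixOf_iff_prefix]
      exact ⟨rest, by simp⟩
    rw [if_pos hpre]
    simp
  | cons a p' ih =>
    intro fuel rest cur acc h hf
    obtain ⟨f, rfl⟩ : ∃ f, fuel = f + 1 := ⟨fuel - 1, by omega⟩
    simp only [List.cons_append]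
    rw [go_succ_cons]
    have h0 : ¬ sep <+: (a :: (p' ++ (sep ++ rest))) := by
      have := h 0 (by simp)
      simpa using this
    rw [if_neg (by rw [List.isPrefixOf_iff_prefix]; simpa using h0)]
    rw [ih f rest (a :: cur) acc (fun i hi => by
      have := h (i+1) (by simpa using Nat.succ_lt_succ hi)
      simpa using this) (by simpa using Nat.le_of_succ_le_succ hf)]
    simp

theorem splitOn_len_ge_one (s sep : List Char) : 1 ≤ (PySem.Chars.splitOn s sep).length := by
  have := go_len sep (s.length + 1) s [] []
  simpa [PySem.Chars.splitOn] using this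

theorem go_not_mem (c : Char) : ∀ (fuel : Nat) (s cur : List Char) (acc : List (List Char)), c ∉ s →
    PySem.Chars.splitOn.go [c] fuel s cur acc = ((cur.reverse ++ s) :: acc).reverse := by
  intro fuel
  induction fuel with
  | zero => intro s cur acc _; simp [go_zero]
  | succ f ih =>
    intro s cur acc h
    cases s with
    | nil => simp [go_succ_nil]
    | cons a rest =>
      rw [go_succ_cons, if_neg]
      · rw [ih rest (a :: cur) acc (by simp at h; tauto)]
        simp
      · rw [List.isPrefixOf_iff_prefix]
        intro hp
        exact h (by simpa using (List.IsPrefix.mem (by simp) hp))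

theorem splitOn_not_mem (c : Char) (s : List Char) (h : c ∉ s) :
    PySem.Chars.splitOn s [c] = [s] := by
  unfold PySem.Chars.splitOn
  rw [go_not_mem c _ s [] [] h]
  simp

theorem splitOn_cut (c : Char) (p s : List Char) (hp : c ∉ p) :
    PySem.Chars.splitOn (p ++ c :: s) [c] = p :: PySem.Chars.splitOn s [c] := by
  unfold PySem.Chars.splitOn
  have hocc : ∀ i, i < p.length → ¬ [c] <+: List.drop i (p ++ [c] ++ s) := by
    intro i hi hpre
    rcases hpre with ⟨t, ht⟩
    have h0 : (List.drop i (p ++ [c] ++ s))[0]? = some c := by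
      rw [← ht]; simp
    rw [List.getElem?_drop] at h0
    simp only [Nat.add_zero] at h0
    have hpl : (p ++ ([c] ++ s))[i]? = p[i]? := List.getElem?_append_left hi
    rw [List.append_assoc, hpl] at h0
    exact hp (List.mem_of_getElem? h0)
  have hf : p.length + 1 ≤ (p ++ c :: s).length + 1 := by simp
  have hw := go_walk [c] (by simp) p ((p ++ c :: s).length + 1) s [] [] hocc hf
  simp only [List.append_assoc, List.singleton_append] at hw
  rw [hw]
  have harith : (p ++ c :: s).length + 1 - (p.length + 1) = s.length + 1 := by simp
  rw [harith, go_acc]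
  simp

theorem splitOn_len_of_mem (c : Char) (s : List Char) (h : c ∈ s) :
    2 ≤ (PySem.Chars.splitOn s [c]).length := by
  have hidx : (PySem.List.index? s c).isSome := (PySem.List.index?_isSome_iff _ _).mpr h
  obtain ⟨k, hk⟩ := Option.isSome_iff_exists.mp hidx
  obtain ⟨p, t, rfl, -, hcp⟩ := (PySem.List.index?_eq_some_iff _ _ _).mp hk
  rw [splitOn_cut c p t hcp]
  have := splitOn_len_ge_one t [c]
  simp; omega

theorem splitOn_of_len_one (c : Char) (s : List Char)
    (h : (PySem.Chars.splitOn s [c]).length = 1) : PySem.Chars.splitOn s [c] = [s] := by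
  by_cases hc : c ∈ s
  · have := splitOn_len_of_mem c s hc; omega
  · exact splitOn_not_mem c s hc

theorem splitOn_infix_len (s sep : List Char) (hsep : sep ≠ []) (h : sep <:+: s) :
    2 ≤ (PySem.Chars.splitOn s sep).length := by
  have hfind : 0 ≤ PySem.Chars.find s sep := (PySem.Chars.find_nonneg_iff _ _).mpr h
  obtain ⟨hpre, hfirst⟩ := PySem.Chars.find_spec hfind
  set k := (PySem.Chars.find s sep).toNat with hkdef
  have hkle : k ≤ s.length := by
    have := PySem.Chars.find_le_length s sep
    omega
  obtain ⟨rest, hrest⟩ := hpre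
  have hs : s = s.take k ++ sep ++ rest := by
    rw [List.append_assoc, hrest, List.take_append_drop]
  have hocc : ∀ i, i < (s.take k).length → ¬ sep <+: List.drop i (s.take k ++ sep ++ rest) := by
    intro i hi
    rw [← hs]
    exact hfirst i (by simp at hi; omega)
  have hf : (s.take k).length + 1 ≤ s.length + 1 := by simp
  have hw := go_walk sep hsep (s.take k) (s.length + 1) rest [] [] hocc hf
  unfold PySem.Chars.splitOn
  nth_rewrite 2 [hs]
  rw [hw]
  have := go_len sep (s.length + 1 - ((s.take k).length + 1)) rest [] [[].reverse ++ s.take k]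
  simp at this ⊢
  omega

-- ===== String-level bridges =====
theorem pysplit_toList (s sep : String) (hsep : sep ≠ "") :
    (pysplit s sep).map String.toList = PySem.Chars.splitOn s.toList sep.toList := by
  have hb := PySem.Str.split?_map s sep
  have hne : sep.toList.isEmpty = false := by
    rw [List.isEmpty_eq_false_iff]
    intro hnil
    exact hsep (String.toList_inj.mp (by simp [hnil]))
  rw [PySem.Chars.split?, if_neg (by simp [hne])] at hb
  cases hsp : PySem.Str.split? s sep with
  | none => rw [hsp] at hb; simp at hb
  | some l => rw [hsp] at hb; simp at hb; simpa [pysplit, hsp] using hb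

theorem toList_injective : Function.Injective String.toList := fun _ _ h => String.toList_inj.mp h

theorem pysplit_omit (x : String) (h : (pysplit x "=").length = 1) :
    pysplit ("omit_f=" ++ x) "=" = ["omit_f", x] := by
  have hb := pysplit_toList ("omit_f=" ++ x) "=" (by decide)
  rw [show ("=" : String).toList = ['='] from rfl] at hb
  have htl : ("omit_f=" ++ x).toList = "omit_f".toList ++ '=' :: x.toList := by
    rw [String.toList_append]; rfl
  rw [htl, splitOn_cut '=' _ _ (by decide)] at hb
  -- splitOn x.toList ['='] = [x.toList]
  have hb2 := pysplit_toList x "=" (by decide)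
  rw [show ("=" : String).toList = ['='] from rfl] at hb2
  have hlen : (PySem.Chars.splitOn x.toList ['=']).length = 1 := by
    rw [← hb2]; simpa using h
  rw [splitOn_of_len_one '=' x.toList hlen] at hb
  apply List.map_injective_iff.mpr toList_injective
  rw [hb]; rfl

theorem pysplit_filters_len (shard : String) (h : PySem.Str.isIn "filters: " shard = true) :
    2 ≤ (pysplit shard "filters: ").length := by
  have hinf := (PySem.Str.isIn_iff_infix _ _).mp h
  have := splitOn_infix_len shard.toList ("filters: ").toList (by decide) hinf
  have hb := pysplit_toList shard "filters: " (by decide)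
  have h2 : 2 ≤ ((pysplit shard "filters: ").map String.toList).length := by rw [hb]; omega
  simpa using h2

def fA (x : String) : String := if (pysplit x "=").length = 1 then "omit_f=" ++ x else x

theorem fA_ne (x y : String) (hx : (pysplit x "=").length = 1) : fA y ≠ x := by
  unfold fA
  by_cases hy : (pysplit y "=").length = 1
  · rw [if_pos hy]
    intro he
    have := pysplit_omit y hy
    rw [he] at this
    rw [this] at hx
    simp at hx
  · rw [if_neg hy]
    intro he
    rw [he] at hy
    exact hy hx

theorem mutate_inv : ∀ (suf pre : List String),
    (List.range' pre.length suf.length).foldl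
      (fun cur i =>
        let filt := cur.getD i ""
        if (pysplit filt "=").length = 1 then
          cur.set ((PySem.List.index? cur filt).getD 0) ("omit_f=" ++ filt)
        else cur)
      (pre.map fA ++ suf) = (pre ++ suf).map fA := by
  intro suf
  induction suf with
  | nil => intro pre; simp
  | cons x suf' ih =>
    intro pre
    rw [List.length_cons, List.range'_succ, List.foldl_cons]
    have hget : (pre.map fA ++ x :: suf').getD pre.length "" = x := by
      rw [List.getD_eq_getElem?_getD, List.getElem?_append_right (by simp)]
      simp
    simp only [hget]
    by_cases hx : (pysplit x "=").length = 1
    · rw [if_pos hx]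
      have hnotmem : x ∉ pre.map fA := by
        simp only [List.mem_map, not_exists]
        rintro y ⟨hy, he⟩
        exact fA_ne x y hx he
      have hidx : PySem.List.index? (pre.map fA ++ x :: suf') x = some pre.length :=
        (PySem.List.index?_eq_some_iff _ _ _).mpr ⟨pre.map fA, suf', rfl, by simp, hnotmem⟩
      rw [hidx]
      have hset : (pre.map fA ++ x :: suf').set pre.length ("omit_f=" ++ x)
          = (pre ++ [x]).map fA ++ suf' := by
        simp [fA, if_pos hx]
      simp only [Option.getD_some, hset]
      have := ih (pre ++ [x])
      simpa using this
    · rw [if_neg hx]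
      have hx' : (pre.map fA ++ x :: suf') = (pre ++ [x]).map fA ++ suf' := by
        simp [fA, if_neg hx]
      rw [hx']
      have := ih (pre ++ [x])
      simpa using this

theorem dict_eq : ∀ (fg : List String) (d : PySem.Dict String (List String)),
    (fg.map fA).foldl
      (fun d c_filter => d.insert ((pysplit c_filter "=").getD 0 "")
          (pysplit ((pysplit c_filter "=").getD 1 "") ",")) d
    = fg.foldl
      (fun filters filt =>
        let parts := pysplit filt "="
        if parts.length = 1 then filters.insert "omit_f" (pysplit filt ",")
        else filters.insert (parts.getD 0 "") (pysplit (parts.getD 1 "") ",")) d := by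
  intro fg
  induction fg with
  | nil => intro d; rfl
  | cons x fg' ih =>
    intro d
    simp only [List.map_cons, List.foldl_cons]
    by_cases hx : (pysplit x "=").length = 1
    · have : fA x = "omit_f=" ++ x := by rw [fA, if_pos hx]
      rw [this]
      have homit := pysplit_omit x hx
      rw [ih]
      simp only [homit, hx, if_pos]
      rfl
    · have : fA x = x := by rw [fA, if_neg hx]
      rw [this, ih]
      simp only [if_neg hx]

theorem group_items_eq (group : String) :
    ((List.range (pysplit group "&").length).foldl (fun cur i =>
        let filt := cur.getD i ""
        if (pysplit filt "=").length = 1 then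
          cur.set ((PySem.List.index? cur filt).getD 0) ("omit_f=" ++ filt)
        else cur) (pysplit group "&")).foldl (fun d c_filter =>
          d.insert ((pysplit c_filter "=").getD 0 "")
                   (pysplit ((pysplit c_filter "=").getD 1 "") ",")) PySem.Dict.empty
    = (pysplit group "&").foldl (fun filters filt =>
          let parts := pysplit filt "="
          if parts.length = 1 then
            filters.insert "omit_f" (pysplit filt ",")
          else
            filters.insert (parts.getD 0 "") (pysplit (parts.getD 1 "") ",")) PySem.Dict.empty := by
  have hm := mutate_inv (pysplit group "&") []
  simp only [List.map_nil, List.nil_append, List.length_nil] at hm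
  rw [List.range_eq_range']
  rw [hm]
  exact dict_eq (pysplit group "&") PySem.Dict.empty

theorem main_eq (shard : String) (hpre : PySem.Str.isIn "filters: " shard = true) :
    map_shard shard = map_shard_alt shard := by
  have hlen := pysplit_filters_len shard hpre
  have hget := PySem.List.pyGet?_eq_some_getElem (pysplit shard "filters: ") (i := 1)
    (by omega) (by exact_mod_cast hlen)
  unfold map_shard map_shard_alt
  rw [hget]
  simp only
  rw [PySem.List.foldl_append_singleton_eq_map, PySem.List.foldl_append_singleton_eq_map]
  refine List.map_congr_left (fun group _ => ?_)
  exact congrArg PySem.Dict.items (group_items_eq group)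

-- ===== VERDICT (by name: the statement is the Claim_ definition above) =====
theorem map_shard_spec : Claim_equal_map_shard := by
  intro shard _ hpre
  unfold Spec_map_shard
  exact main_eq shard hpre
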